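-- pv_equiv track=rewrite | github.com/Tyastrab/computational-topology | ParityAlgorithm.py | getLows
-- ===== SOURCE A (Python) =====
-- def getLows(matrix):
--
--   # initialize all lowest ones to None
--   lows = [None]*len(matrix[0])
--
--   # go from bottom to top of each column
--   for col in range(len(matrix[0])):
--     for row in range(len(matrix)-1, -1, -1):
--
--       # if we encounter a 1, this is the lowest one in the column, break
--       if matrix[row][col] == 1:
--         lows[col] = row
--         break
--
--   return lows
-- ===== SOURCE B (Python) =====
-- def getLows(matrix):
--   # one top-down row-major pass; later rows overwrite, so each column ends at its lowest 1
--   lows = [None]*len(matrix[0])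
--   for row in range(len(matrix)):
--     for col in range(len(matrix[0])):
--       if matrix[row][col] == 1:
--         lows[col] = row
--   return lows
-- ===== Notes on version B (the rewrite author's own statement) =====
-- stated objective: alternative
-- what changed: Replaces the per-column bottom-up scan with early break by a single top-down row-major pass in which later (lower) rows overwrite earlier entries, so each column ends holding its lowest 1.
-- outside the precondition, e.g. on getLows([[1, 1], [0], [1, 1]]): A returns [2, 2], B raises IndexError
import Mathlib
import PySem

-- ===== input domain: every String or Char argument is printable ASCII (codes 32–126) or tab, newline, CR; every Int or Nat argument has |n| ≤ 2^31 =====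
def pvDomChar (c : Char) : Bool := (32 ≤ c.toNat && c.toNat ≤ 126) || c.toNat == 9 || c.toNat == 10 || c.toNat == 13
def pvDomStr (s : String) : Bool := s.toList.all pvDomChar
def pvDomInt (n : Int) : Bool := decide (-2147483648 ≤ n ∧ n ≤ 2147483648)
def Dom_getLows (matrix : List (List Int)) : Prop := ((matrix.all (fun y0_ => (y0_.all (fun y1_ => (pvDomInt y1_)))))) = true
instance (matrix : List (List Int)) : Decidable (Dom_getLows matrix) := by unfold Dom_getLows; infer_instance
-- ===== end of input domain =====

-- B replaces A's per-column bottom-up scan (with break) by one top-down row-major overwrite pass; same cost, different decomposition.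


-- ===== PORT A =====
-- inner 'for row in range(len(matrix)-1,-1,-1): … break' : first row index r in the
-- descending list with matrix[r][col] == 1 (indexing exact under Pre_ via pyGet?)
def lowA (matrix : List (List Int)) (col : Int) : List Int → Option Int
  | [] => none
  | r :: rs =>
      if PySem.List.pyGetD ((PySem.List.pyGet? matrix r).getD []) col 0 = 1 then some r
      else lowA matrix col rs

def getLows (matrix : List (List Int)) : List (Option Int) :=
  (List.range (matrix.headD []).length).map
    (fun col : Nat => lowA matrix (Int.ofNat col)
      (PySem.List.pyRange ((matrix.length : Int) - 1) (-1) (-1)))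

-- ===== PORT B =====
-- inner 'for col in range(len(matrix[0])): if matrix[row][col]==1: lows[col]=row'
-- (lows has length len(matrix[0]) = row length under Pre_)
def updB (r : Int) (lows : List (Option Int)) (row : List Int) : List (Option Int) :=
  List.zipWith (fun l x => if x = 1 then some r else l) lows row

def bLoop : List (List Int) → Int → List (Option Int) → List (Option Int)
  | [], _, lows => lows
  | row :: rest, r, lows => bLoop rest (r + 1) (updB r lows row)

def getLows_alt (matrix : List (List Int)) : List (Option Int) :=
  bLoop matrix 0 (List.replicate (matrix.headD []).length none)

-- ===== PRECONDITION & SPEC =====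
-- Pre_ excludes the empty matrix (A raises IndexError on matrix[0]) and jagged matrices with a
-- row shorter than the first row, where A either raises IndexError or returns only by accident
-- of its break-based scan order while B raises IndexError there.
def Pre_getLows (matrix : List (List Int)) : Prop :=
  matrix ≠ [] ∧ ∀ row ∈ matrix, (matrix.headD []).length ≤ row.length
instance (matrix : List (List Int)) : Decidable (Pre_getLows matrix) := by
  unfold Pre_getLows; infer_instance
def pvWitness_getLows : List (List Int) := [[0, 1], [1, 0]]
def Spec_getLows (matrix : List (List Int)) (out : List (Option Int)) : Prop := out = getLows_alt matrix
instance (matrix : List (List Int)) (out : List (Option Int)) : Decidable (Spec_getLows matrix out) := by unfold Spec_getLows; infer_instance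

-- ===== CLAIM (what is proved, stated in full; the proofs are below) =====
def Claim_equal_getLows : Prop := ∀ (matrix : List (List Int)), Dom_getLows matrix → Pre_getLows matrix → Spec_getLows matrix (getLows matrix)

-- ===== LEMMAS AND PROOFS =====

-- last row index (counting from r) whose entry at column c equals 1
def lastHit : List (List Int) → Int → Nat → Option Int
  | [], _, _ => none
  | row :: rest, r, c =>
      match lastHit rest (r + 1) c with
      | some v => some v
      | none => if row.getD c 0 = 1 then some r else none

theorem lastHit_append (l : List (List Int)) (row : List Int) (r : Int) (c : Nat) :
    lastHit (l ++ [row]) r c =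
      match (if row.getD c 0 = 1 then some (r + l.length) else none) with
      | some v => some v
      | none => lastHit l r c := by
  induction l generalizing r with
  | nil => simp [lastHit]; split <;> rfl
  | cons a l ih =>
      simp only [List.cons_append, lastHit, ih, List.length_cons]
      have : r + 1 + (l.length : Int) = r + (l.length + 1 : Nat) := by push_cast; ring
      rw [this]
      rcases h : (if row.getD c 0 = 1 then some (r + ((l.length : Int) + 1)) else none) with _ | v
      · split at h
        · simp at h
        · simp_all
      · split at h <;> simp_all [Int.add_comm]

theorem bLoop_char (rows : List (List Int)) (r : Int) (lows : List (Option Int))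
    (h : ∀ row ∈ rows, lows.length ≤ row.length) :
    bLoop rows r lows =
      (List.range lows.length).map
        (fun c => match lastHit rows r c with
                  | some v => some v
                  | none => lows.getD c none) := by
  induction rows generalizing r lows with
  | nil =>
      simp only [bLoop, lastHit]
      apply List.ext_getElem
      · simp
      · intro i h1 h2
        simp [List.getD_eq_getElem?_getD, List.getElem?_eq_getElem h1]
  | cons row rest ih =>
      have hlen : (updB r lows row).length = lows.length := by
        have := h row (by simp)
        simp [updB]; omega
      rw [bLoop, ih (r + 1) _ (by intro q hq; rw [hlen]; exact h q (by simp [hq]))]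
      rw [hlen]
      apply List.map_congr_left
      intro c hc
      rw [List.mem_range] at hc
      have hrow : c < row.length := lt_of_lt_of_le hc (h row (by simp))
      simp only [lastHit]
      rcases hl : lastHit rest (r + 1) c with _ | v
      · have : (updB r lows row).getD c none =
            if row.getD c 0 = 1 then some r else lows.getD c none := by
          simp [updB, List.getD_eq_getElem?_getD, List.getElem?_zipWith,
            List.getElem?_eq_getElem hc, List.getElem?_eq_getElem hrow]
        rw [this]
        by_cases hb : row[c]?.getD 0 = 1 <;> simp [hb]
      · simp

theorem lowA_char (matrix : List (List Int)) (c : Nat) (_hc : ∀ row ∈ matrix, c < row.length)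
    (k : Nat) (hk : k ≤ matrix.length) :
    lowA matrix (c : Int) (PySem.List.pyRange ((k : Int) - 1) (-1) (-1)) =
      lastHit (matrix.take k) 0 c := by
  induction k with
  | zero => simp [PySem.List.pyRange_neg_one_eq_nil, lowA, lastHit]
  | succ k ih =>
      have hk' : k ≤ matrix.length := Nat.le_of_succ_le hk
      have hkm : k < matrix.length := hk
      rw [PySem.List.pyRange_neg_one_cons (by push_cast; omega), lowA]
      have harith : ((k : Int) + 1) - 1 - 1 = (k : Int) - 1 := by ring
      have hcast : ((k + 1 : Nat) : Int) - 1 = (k : Int) := by push_cast; ring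
      rw [hcast]
      have htake : matrix.take (k + 1) = matrix.take k ++ [matrix[k]] := by
        rw [List.take_add_one, List.getElem?_eq_getElem hkm]; rfl
      rw [htake, lastHit_append]
      have hget : PySem.List.pyGet? matrix (k : Int) = some matrix[k] :=
        PySem.List.pyGet?_ofNat matrix k hkm
      have hcell : PySem.List.pyGetD ((PySem.List.pyGet? matrix (k : Int)).getD []) (c : Int) 0 =
          (matrix[k]).getD c 0 := by
        rw [hget]; simp [PySem.List.pyGetD_natCast]
      rw [hcell]
      have hlen : (matrix.take k).length = k := List.length_take_of_le hk'
      split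
      · simp [hlen]
      · have : ((k : Int) - 1) = ((k : Int)) - 1 := rfl
        rw [show (k : Int) - 1 = ((k : Int)) - 1 from rfl]
        exact ih hk'

-- ===== VERDICT (by name: the statement is the Claim_ definition above) =====
theorem getLows_spec : Claim_equal_getLows := by
  intro matrix _ hpre
  obtain ⟨hne, hrows⟩ := hpre
  unfold Spec_getLows getLows getLows_alt
  rw [bLoop_char matrix 0 _ (by intro row hr; rw [List.length_replicate]; exact hrows row hr)]
  rw [List.length_replicate]
  apply List.map_congr_left
  intro c hc
  rw [List.mem_range] at hc
  rw [show Int.ofNat c = (c : Int) from rfl,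
    lowA_char matrix c (fun row hr => lt_of_lt_of_le hc (hrows row hr)) matrix.length le_rfl,
    List.take_length]
  have hh : matrix.headD [] = matrix.head?.getD [] := by cases matrix <;> rfl
  rw [hh] at hc
  rcases lastHit matrix 0 c with _ | v <;>
    simp [List.getD_eq_getElem?_getD, hc]
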